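-- pv_equiv track=rewrite | github.com/darekpe79/work_space | definicje.py | list_of_dict_from_list_of_lists
-- ===== SOURCE A (Python) =====
-- def list_of_dict_from_list_of_lists (records):
--     recs2table = []
--     for record in records:
--         rec_dict = {}
--         for field in record:
--             if field[1:4] in rec_dict.keys():
--                 rec_dict[field[1:4]] = '❦'.join([rec_dict[field[1:4]], field[6:].strip()])
--             else:
--                 rec_dict[field[1:4]] = field[6:].strip()
--         recs2table.append(rec_dict)
--     return recs2table
-- ===== SOURCE B (Python) =====
-- def _group(record):
--     # phase 1: collect all pieces per tag, no membership branch
--     groups = {}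
--     for field in record:
--         groups.setdefault(field[1:4], []).append(field[6:].strip())
--     # phase 2: join each group's pieces once
--     return {tag: '\u2766'.join(vals) for tag, vals in groups.items()}
--
-- def list_of_dict_from_list_of_lists(records):
--     return [_group(record) for record in records]
-- ===== Notes on version B (the rewrite author's own statement) =====
-- stated objective: simpler
-- what changed: B replaces A's in-loop membership test and incremental string concatenation by a two-phase grouping: one branch-free pass appending each stripped payload to a per-tag list, then a separate pass joining each list once.
import Mathlib
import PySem

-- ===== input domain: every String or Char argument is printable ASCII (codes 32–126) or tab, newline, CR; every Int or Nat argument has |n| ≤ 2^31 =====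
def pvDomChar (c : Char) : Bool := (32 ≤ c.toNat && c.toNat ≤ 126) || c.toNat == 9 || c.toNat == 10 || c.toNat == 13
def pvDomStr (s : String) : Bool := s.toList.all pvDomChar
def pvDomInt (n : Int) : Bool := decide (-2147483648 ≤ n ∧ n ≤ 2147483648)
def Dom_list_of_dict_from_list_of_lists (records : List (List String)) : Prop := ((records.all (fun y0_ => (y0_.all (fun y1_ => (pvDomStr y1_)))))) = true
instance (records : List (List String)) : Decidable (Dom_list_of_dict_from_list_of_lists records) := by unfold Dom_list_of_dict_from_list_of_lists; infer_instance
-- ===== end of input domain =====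

-- B groups each record's stripped payloads into per-tag lists in one branch-free pass and joins
-- each list with '❦' once in a second pass; A concatenates incrementally behind a membership test.

-- ===== PORT A =====
-- one field of A's inner loop: membership test, then incremental '❦'.join or fresh insert
def pvStepA (d : PySem.Dict String String) (field : String) : PySem.Dict String String :=
  if d.contains (PySem.Str.slice field (some 1) (some 4)) then
    d.insert (PySem.Str.slice field (some 1) (some 4))
      (PySem.Str.join "❦" [d.getD (PySem.Str.slice field (some 1) (some 4)) "",
        PySem.Str.strip (PySem.Str.slice field (some 6) none)])
  else
    d.insert (PySem.Str.slice field (some 1) (some 4))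
      (PySem.Str.strip (PySem.Str.slice field (some 6) none))

def list_of_dict_from_list_of_lists (records : List (List String)) : List (List (String × String)) :=
  records.foldl (fun recs2table record =>
    recs2table ++ [(record.foldl pvStepA PySem.Dict.empty).items]) []

-- ===== PORT B =====
-- Source B's phase 1: groups.setdefault(field[1:4], []).append(field[6:].strip())
def pvStepB (g : PySem.Dict String (List String)) (field : String) : PySem.Dict String (List String) :=
  g.modify (PySem.Str.slice field (some 1) (some 4)) []
    (· ++ [PySem.Str.strip (PySem.Str.slice field (some 6) none)])

-- Source B's _group: phase 1 builds the per-tag lists, phase 2 joins each list once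
def pvGroup (record : List String) : List (String × String) :=
  (record.foldl pvStepB PySem.Dict.empty).items.map (fun p => (p.1, PySem.Str.join "❦" p.2))

def list_of_dict_from_list_of_lists_alt (records : List (List String)) : List (List (String × String)) :=
  records.map pvGroup

-- ===== PRECONDITION & SPEC =====
def Spec_list_of_dict_from_list_of_lists (records : List (List String)) (out : List (List (String × String))) : Prop := out = list_of_dict_from_list_of_lists_alt records
instance (records : List (List String)) (out : List (List (String × String))) : Decidable (Spec_list_of_dict_from_list_of_lists records out) := by unfold Spec_list_of_dict_from_list_of_lists; infer_instance

-- ===== CLAIM (what is proved, stated in full; the proofs are below) =====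
def Claim_equal_list_of_dict_from_list_of_lists : Prop := ∀ (records : List (List String)), Dom_list_of_dict_from_list_of_lists records → Spec_list_of_dict_from_list_of_lists records (list_of_dict_from_list_of_lists records)

-- ===== LEMMAS AND PROOFS =====

-- joining one more piece onto a nonempty group = the old join, '❦', then the piece
theorem pvCharsJoinApp (sep v : List Char) (vs : List (List Char)) (h : vs ≠ []) :
    PySem.Chars.join sep (vs ++ [v]) = PySem.Chars.join sep vs ++ sep ++ v := by
  induction vs with
  | nil => exact absurd rfl h
  | cons a rest ih =>
    cases rest with
    | nil => simp [PySem.Chars.join_cons_cons, PySem.Chars.join_singleton]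
    | cons b rest' =>
      have ih' := ih (by simp)
      simp only [List.cons_append] at ih' ⊢
      rw [PySem.Chars.join_cons_cons, ih', PySem.Chars.join_cons_cons]
      simp [List.append_assoc]

theorem pvStrJoinApp (vs : List String) (v : String) (h : vs ≠ []) :
    PySem.Str.join "❦" (vs ++ [v]) = PySem.Str.join "❦" [PySem.Str.join "❦" vs, v] := by
  simp only [PySem.Str.join, List.map_append, List.map_cons, List.map_nil, String.toList_ofList]
  rw [pvCharsJoinApp _ _ _ (by simpa using h), PySem.Chars.join_cons_cons,
    PySem.Chars.join_singleton]

theorem pvStrJoinSingleton (v : String) : PySem.Str.join "❦" [v] = v := by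
  simp [PySem.Str.join, PySem.Chars.join_singleton]

-- the joined-map relation between A's running dict and B's group dict
def pvRel (dA : PySem.Dict String String) (dB : PySem.Dict String (List String)) : Prop :=
  dA.items = dB.items.map (fun p => (p.1, PySem.Str.join "❦" p.2)) ∧
    ∀ p ∈ dB.items, p.2 ≠ []

-- one generic field step (key/value already extracted) preserves the relation
theorem pvInsInv (dA : PySem.Dict String String) (dB : PySem.Dict String (List String))
    (h : pvRel dA dB) (key v : String) :
    pvRel (if dA.contains key then dA.insert key (PySem.Str.join "❦" [dA.getD key "", v])
           else dA.insert key v)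
          (dB.modify key [] (· ++ [v])) := by
  obtain ⟨hitems, hne⟩ := h
  have hcont : dA.contains key = dB.contains key := by
    simp [PySem.Dict.contains, hitems, List.any_map, Function.comp_def]
  have hget : dA.get? key = (dB.get? key).map (fun vs => PySem.Str.join "❦" vs) := by
    simp only [PySem.Dict.get?, hitems, List.find?_map, Function.comp_def, Option.map_map]
  by_cases hc : dB.contains key = true
  · -- key already present in both dicts: both replace the matching pairs in place
    obtain ⟨q, hq⟩ : ∃ q, dB.items.find? (fun p => p.1 == key) = some q := by
      rcases hfind : dB.items.find? (fun p => p.1 == key) with _ | q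
      · rw [List.find?_eq_none] at hfind
        simp only [PySem.Dict.contains, List.any_eq_true] at hc
        obtain ⟨p, hp, hpk⟩ := hc
        exact absurd hpk (hfind p hp)
      · exact ⟨q, hfind⟩
    have hqmem : q ∈ dB.items := List.mem_of_find?_eq_some hq
    have hqne : q.2 ≠ [] := hne q hqmem
    have hgetB : dB.get? key = some q.2 := by simp [PySem.Dict.get?, hq]
    have hgetDB : dB.getD key [] = q.2 := by simp [PySem.Dict.getD, hgetB]
    have hgetDA : dA.getD key "" = PySem.Str.join "❦" q.2 := by
      simp [PySem.Dict.getD, hget, hgetB]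
    have hcA : dA.contains key = true := hcont ▸ hc
    constructor
    · simp only [hcA, if_pos, PySem.Dict.modify, hgetDB, hgetDA,
        PySem.Dict.insert, hc, PySem.Dict.items, hitems, List.map_map]
      rw [← pvStrJoinApp q.2 v hqne]
      apply List.map_congr_left
      intro p _
      by_cases hpk : p.1 = key <;> simp [hpk]
    · intro p hp
      simp only [PySem.Dict.modify, PySem.Dict.insert, hc, if_pos, hgetDB,
        PySem.Dict.items, List.mem_map] at hp
      obtain ⟨p', hp', hpp⟩ := hp
      by_cases hpk : p'.1 == key
      · simp only [hpk, if_pos] at hpp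
        simp [← hpp]
      · simp only [hpk] at hpp
        exact hpp ▸ hne p' hp'
  · -- key fresh in both dicts: both append at the end
    have hcA : dA.contains key = false := by rw [hcont]; exact Bool.not_eq_true _ ▸ hc
    have hcB : dB.contains key = false := Bool.not_eq_true _ ▸ hc
    have hgetB : dB.get? key = none := by
      simp only [PySem.Dict.contains, List.any_eq_true, not_exists, not_and] at hc
      simp only [PySem.Dict.get?, Option.map_eq_none_iff, List.find?_eq_none]
      exact fun p hp => hc p hp
    have hgetDB : dB.getD key [] = [] := by simp [PySem.Dict.getD, hgetB]
    constructor
    · simp [PySem.Dict.modify, hgetDB, hcA, hcB, PySem.Dict.insert,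
        PySem.Dict.items, hitems, pvStrJoinSingleton]
    · intro p hp
      simp only [PySem.Dict.modify, PySem.Dict.insert, hcB, hgetDB,
        PySem.Dict.items, List.mem_append, List.mem_singleton,
        Bool.false_eq_true, if_false, List.nil_append] at hp
      rcases hp with hp | hp
      · exact hne p hp
      · simp [hp]

theorem pvStepInv (dA : PySem.Dict String String) (dB : PySem.Dict String (List String))
    (h : pvRel dA dB) (field : String) : pvRel (pvStepA dA field) (pvStepB dB field) :=
  pvInsInv dA dB h (PySem.Str.slice field (some 1) (some 4))
    (PySem.Str.strip (PySem.Str.slice field (some 6) none))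

-- the whole inner loop preserves the relation
theorem pvLoopInv (fields : List String) (dA : PySem.Dict String String)
    (dB : PySem.Dict String (List String)) (h : pvRel dA dB) :
    pvRel (fields.foldl pvStepA dA) (fields.foldl pvStepB dB) := by
  induction fields generalizing dA dB with
  | nil => exact h
  | cons field rest ih => exact ih _ _ (pvStepInv dA dB h field)

-- A's per-record dict, listed out, is exactly B's _group
theorem pvRecordEq (record : List String) :
    (record.foldl pvStepA PySem.Dict.empty).items = pvGroup record :=
  (pvLoopInv record PySem.Dict.empty PySem.Dict.empty
    ⟨by simp [PySem.Dict.empty], by simp [PySem.Dict.empty]⟩).1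

-- A's append-loop over records is a map
theorem pvFoldlAppend (records : List (List String)) (acc : List (List (String × String))) :
    records.foldl (fun recs2table record =>
      recs2table ++ [(record.foldl pvStepA PySem.Dict.empty).items]) acc
      = acc ++ records.map pvGroup := by
  induction records generalizing acc with
  | nil => simp
  | cons r rest ih => simp [ih, pvRecordEq r]

-- ===== VERDICT (by name: the statement is the Claim_ definition above) =====
theorem list_of_dict_from_list_of_lists_spec : Claim_equal_list_of_dict_from_list_of_lists := by
  intro records _
  show list_of_dict_from_list_of_lists records = list_of_dict_from_list_of_lists_alt records
  unfold list_of_dict_from_list_of_lists list_of_dict_from_list_of_lists_alt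
  rw [pvFoldlAppend, List.nil_append]
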